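-- pv_equiv track=rewrite | github.com/galaksi120/Yapay-zeka-destekli-sifreleme-ve-veri-sikistirma-algoritmasi- | Şifreleme ve Sıkıştırma Projesi  sonhali.py | interleave_split
-- ===== SOURCE A (Python) =====
-- def interleave_split(merged, len_v1, len_v2):
--     v1, v2 = [], []
--     i = j = 0
--     for k in range(len(merged)):
--         if k % 2 == 0 and i < len_v1:
--             v1.append(merged[k])
--             i += 1
--         elif j < len_v2:
--             v2.append(merged[k])
--             j += 1
--         elif i < len_v1:
--             v1.append(merged[k])
--             i += 1
--     return v1, v2
-- ===== SOURCE B (Python) =====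
-- def _deal(xs):
--     # deal an alternating run into (evens, odds), two elements per step
--     evens, odds = [], []
--     n = len(xs)
--     k = 0
--     while k < n:
--         evens.append(xs[k])
--         if k + 1 < n:
--             odds.append(xs[k + 1])
--         k += 2
--     return evens, odds
--
--
-- def interleave_split(merged, len_v1, len_v2):
--     c1 = max(0, len_v1)
--     c2 = max(0, len_v2)
--     p = min(c1, c2)
--     v1, v2 = _deal(merged[:2 * p])
--     tail = merged[2 * p:]
--     if c1 > c2:
--         v1 = v1 + tail[:c1 - p]
--     elif c2 > c1:
--         v2 = v2 + tail[:c2 - p]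
--     return v1, v2
-- ===== Notes on version B (the rewrite author's own statement) =====
-- stated objective: alternative
-- what changed: Replaces the per-index modulo loop with priority branches by an arithmetic split: compute p = min of the clamped capacities, deal the interleaved prefix merged[:2p] two elements at a time into the two lists, and append one truncated tail slice to whichever side has leftover capacity.
import Mathlib
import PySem

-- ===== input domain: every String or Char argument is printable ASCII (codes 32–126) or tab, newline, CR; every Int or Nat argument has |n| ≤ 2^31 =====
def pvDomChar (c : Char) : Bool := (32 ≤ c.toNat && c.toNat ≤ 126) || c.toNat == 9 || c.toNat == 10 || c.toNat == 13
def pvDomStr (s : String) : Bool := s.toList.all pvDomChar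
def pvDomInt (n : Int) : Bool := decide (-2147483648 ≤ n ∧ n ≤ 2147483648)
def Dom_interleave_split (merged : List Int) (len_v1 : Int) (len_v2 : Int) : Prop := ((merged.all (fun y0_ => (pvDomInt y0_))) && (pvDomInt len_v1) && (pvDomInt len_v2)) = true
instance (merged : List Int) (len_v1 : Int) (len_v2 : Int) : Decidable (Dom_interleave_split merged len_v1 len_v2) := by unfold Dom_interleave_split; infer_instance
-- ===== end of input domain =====

-- B replaces A's per-index modulo loop with priority branches by an arithmetic split
-- (interleaved prefix dealt pairwise, plus one truncated tail extend); same O(n) cost.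

-- ===== PORT A =====
-- A: loop over k in range(len(merged)), modulo test and capacity-priority branches.
-- merged[k] has 0 ≤ k < len(merged), so pyGetD is exact (no IndexError is reachable).
def interleave_split (merged : List Int) (len_v1 : Int) (len_v2 : Int) : List Int × List Int :=
  let st := (PySem.List.pyRange 0 (PySem.List.len merged) 1).foldl
    (fun (s : List Int × List Int × Int × Int) k =>
      if PySem.Int.mod k 2 = 0 ∧ s.2.2.1 < len_v1 then
        (s.1 ++ [PySem.List.pyGetD merged k 0], s.2.1, s.2.2.1 + 1, s.2.2.2)
      else if s.2.2.2 < len_v2 then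
        (s.1, s.2.1 ++ [PySem.List.pyGetD merged k 0], s.2.2.1, s.2.2.2 + 1)
      else if s.2.2.1 < len_v1 then
        (s.1 ++ [PySem.List.pyGetD merged k 0], s.2.1, s.2.2.1 + 1, s.2.2.2)
      else s)
    ([], [], 0, 0)
  (st.1, st.2.1)

-- ===== PORT B =====
-- _deal's while loop: k starts at 0, steps by 2; xs[k] / xs[k+1] are in range when
-- the guards hold, so pyGetD is exact.
def dealLoop (xs : List Int) (n : Int) (k : Int) (evens odds : List Int) : List Int × List Int :=
  if k < n then
    dealLoop xs n (k + 2)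
      (evens ++ [PySem.List.pyGetD xs k 0])
      (if k + 1 < n then odds ++ [PySem.List.pyGetD xs (k + 1) 0] else odds)
  else (evens, odds)
termination_by (n - k).toNat
decreasing_by omega

-- nonneg slices merged[:2p], merged[2p:], tail[:c-p] ported via PySem.List.slice (exact).
def interleave_split_alt (merged : List Int) (len_v1 : Int) (len_v2 : Int) : List Int × List Int :=
  let c1 := max 0 len_v1
  let c2 := max 0 len_v2
  let p := min c1 c2
  let head := PySem.List.slice merged none (some (2 * p))
  let dv := dealLoop head (PySem.List.len head) 0 [] []
  let tail := PySem.List.slice merged (some (2 * p)) none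
  if c1 > c2 then (dv.1 ++ PySem.List.slice tail none (some (c1 - p)), dv.2)
  else if c2 > c1 then (dv.1, dv.2 ++ PySem.List.slice tail none (some (c2 - p)))
  else dv

-- ===== PRECONDITION & SPEC =====
def Spec_interleave_split (merged : List Int) (len_v1 : Int) (len_v2 : Int) (out : List Int × List Int) : Prop := out = interleave_split_alt merged len_v1 len_v2
instance (merged : List Int) (len_v1 : Int) (len_v2 : Int) (out : List Int × List Int) : Decidable (Spec_interleave_split merged len_v1 len_v2 out) := by unfold Spec_interleave_split; infer_instance

-- ===== CLAIM (what is proved, stated in full; the proofs are below) =====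
def Claim_equal_interleave_split : Prop := ∀ (merged : List Int) (len_v1 : Int) (len_v2 : Int), Dom_interleave_split merged len_v1 len_v2 → Spec_interleave_split merged len_v1 len_v2 (interleave_split merged len_v1 len_v2)

-- ===== LEMMAS AND PROOFS =====

-- A's loop body as a step function over (index, element) pairs
def stepA (c1 c2 : Int) (s : List Int × List Int × Int × Int) (p : Int × Int) :
    List Int × List Int × Int × Int :=
  if PySem.Int.mod p.1 2 = 0 ∧ s.2.2.1 < c1 then
    (s.1 ++ [p.2], s.2.1, s.2.2.1 + 1, s.2.2.2)
  else if s.2.2.2 < c2 then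
    (s.1, s.2.1 ++ [p.2], s.2.2.1, s.2.2.2 + 1)
  else if s.2.2.1 < c1 then
    (s.1 ++ [p.2], s.2.1, s.2.2.1 + 1, s.2.2.2)
  else s

-- A's loop as a structural recursion producing only the appended suffixes
def ref (c1 c2 : Int) : List Int → Int → Int → Int → List Int × List Int
  | [], _, _, _ => ([], [])
  | x :: rest, k, i, j =>
    if PySem.Int.mod k 2 = 0 ∧ i < c1 then
      let r := ref c1 c2 rest (k + 1) (i + 1) j; (x :: r.1, r.2)
    else if j < c2 then
      let r := ref c1 c2 rest (k + 1) i (j + 1); (r.1, x :: r.2)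
    else if i < c1 then
      let r := ref c1 c2 rest (k + 1) (i + 1) j; (x :: r.1, r.2)
    else ref c1 c2 rest (k + 1) i j

-- structural pair-dealing (what dealLoop computes)
def dealPair : List Int → List Int × List Int
  | [] => ([], [])
  | [x] => ([x], [])
  | x :: y :: rest => let r := dealPair rest; (x :: r.1, y :: r.2)

-- closed form of ref (phi) used by the main lemma
def phi (c1 c2 : Int) (xs : List Int) (i j : Int) (n : Nat) : List Int × List Int :=
  let d := dealPair (xs.take (2 * n))
  let tl := xs.drop (2 * n)
  if c2 - j < c1 - i then (d.1 ++ tl.take (c1 - i - n).toNat, d.2)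
  else if c1 - i < c2 - j then (d.1, d.2 ++ tl.take (c2 - j - n).toNat)
  else d

lemma mod2_eq (k : Int) : PySem.Int.mod k 2 = k % 2 :=
  PySem.Int.mod_eq_emod_of_pos (by omega)

lemma foldl_stepA (c1 c2 : Int) (xs : List Int) : ∀ (k i j : Int) (v1 v2 : List Int),
    ((PySem.List.enumerate xs k).foldl (stepA c1 c2) (v1, v2, i, j)).1
      = v1 ++ (ref c1 c2 xs k i j).1 ∧
    ((PySem.List.enumerate xs k).foldl (stepA c1 c2) (v1, v2, i, j)).2.1
      = v2 ++ (ref c1 c2 xs k i j).2 := by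
  induction xs with
  | nil => intro k i j v1 v2; simp [PySem.List.enumerate, ref]
  | cons x rest ih =>
    intro k i j v1 v2
    rw [PySem.List.enumerate_cons, List.foldl_cons]
    by_cases h1 : (2:Int) ∣ k ∧ i < c1
    · obtain ⟨ha, hb⟩ := ih (k+1) (i+1) j (v1 ++ [x]) v2
      constructor <;> simp [stepA, ref, h1.1, h1.2, ha, hb, List.append_assoc]
    · by_cases h2 : j < c2
      · obtain ⟨ha, hb⟩ := ih (k+1) i (j+1) v1 (v2 ++ [x])
        constructor <;> simp [stepA, ref, h1, h2, ha, hb, List.append_assoc]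
      · by_cases h3 : i < c1
        · obtain ⟨ha, hb⟩ := ih (k+1) (i+1) j (v1 ++ [x]) v2
          constructor <;> simp [stepA, ref, h2, h3, ha, hb, List.append_assoc]
        · obtain ⟨ha, hb⟩ := ih (k+1) i j v1 v2
          constructor <;> simp [stepA, ref, h2, h3, ha, hb]

lemma ref_v2only (c1 c2 : Int) (xs : List Int) : ∀ (k i j : Int), c1 ≤ i →
    ref c1 c2 xs k i j = ([], xs.take (c2 - j).toNat) := by
  induction xs with
  | nil => intro k i j hi; simp [ref]
  | cons x rest ih =>
    intro k i j hi
    have h3 : ¬ i < c1 := by omega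
    by_cases h2 : j < c2
    · have ht : (c2 - j).toNat = (c2 - (j+1)).toNat + 1 := by omega
      simp [ref, h2, h3, ih (k+1) i (j+1) hi, ht, List.take_succ_cons]
    · have ht : (c2 - j).toNat = 0 := by omega
      simp [ref, h2, h3, ih (k+1) i j hi, ht]

lemma ref_v1only (c1 c2 : Int) (xs : List Int) : ∀ (k i j : Int), c2 ≤ j →
    ref c1 c2 xs k i j = (xs.take (c1 - i).toNat, []) := by
  induction xs with
  | nil => intro k i j hj; simp [ref]
  | cons x rest ih =>
    intro k i j hj
    have h2 : ¬ j < c2 := by omega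
    by_cases h3 : i < c1
    · have ht : (c1 - i).toNat = (c1 - (i+1)).toNat + 1 := by omega
      by_cases hd : (2:Int) ∣ k
      · simp [ref, hd, h3, ih (k+1) (i+1) j hj, ht, List.take_succ_cons]
      · simp [ref, hd, h2, h3, ih (k+1) (i+1) j hj, ht, List.take_succ_cons]
    · have ht : (c1 - i).toNat = 0 := by omega
      simp [ref, h2, h3, ih (k+1) i j hj, ht]

lemma ref_main (n : Nat) : ∀ (c1 c2 : Int) (xs : List Int) (k i j : Int),
    PySem.Int.mod k 2 = 0 →
    min (max 0 (c1 - i)) (max 0 (c2 - j)) = (n : Int) →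
    ref c1 c2 xs k i j = phi c1 c2 xs i j n := by
  induction n with
  | zero =>
    intro c1 c2 xs k i j hk h
    rcases (by omega : c1 ≤ i ∨ c2 ≤ j) with hi | hj
    · rw [ref_v2only c1 c2 xs k i j hi]
      unfold phi
      split_ifs with h1 h2
      · have e1 : (c2 - j).toNat = 0 := by omega
        simp [e1, dealPair]
        exact Or.inl hi
      · simp [dealPair]
      · have e1 : (c2 - j).toNat = 0 := by omega
        simp [e1, dealPair]
    · rw [ref_v1only c1 c2 xs k i j hj]
      unfold phi
      split_ifs with h1 h2
      · simp [dealPair]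
      · have e1 : (c1 - i).toNat = 0 := by omega
        simp [e1, dealPair]
        exact Or.inl hj
      · have e1 : (c1 - i).toNat = 0 := by omega
        simp [e1, dealPair]
  | succ n IH =>
    intro c1 c2 xs k i j hk h
    have hi : i < c1 := by omega
    have hj : j < c2 := by omega
    have hd : (2:Int) ∣ k := by rw [mod2_eq] at hk; omega
    match xs with
    | [] =>
      unfold phi
      split_ifs <;> simp [ref, dealPair]
    | [x] =>
      have t1 : List.take (2*(n+1)) [x] = [x] :=
        List.take_of_length_le (by simp only [List.length_cons, List.length_nil]; omega)
      have t2 : List.drop (2*(n+1)) [x] = ([] : List Int) :=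
        List.drop_of_length_le (by simp only [List.length_cons, List.length_nil]; omega)
      unfold phi
      rw [t1, t2]
      split_ifs <;> simp [ref, hd, hi, dealPair]
    | x :: y :: rest =>
      have hd1 : ¬ (2:Int) ∣ (k+1) := by omega
      have hk2 : PySem.Int.mod (k+2) 2 = 0 := by
        rw [mod2_eq] at hk ⊢; omega
      have hmin : min (max 0 (c1-(i+1))) (max 0 (c2-(j+1))) = (n:Int) := by
        push_cast at h ⊢; omega
      have hrec := IH c1 c2 rest (k+2) (i+1) (j+1) hk2 hmin
      have e1 : (2*(n+1)) = (2*n+1)+1 := by ring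
      have e2 : c1 - (i+1) - (n:Int) = c1 - i - ((n+1:Nat):Int) := by push_cast; ring
      have e3 : c2 - (j+1) - (n:Int) = c2 - j - ((n+1:Nat):Int) := by push_cast; ring
      have ec1 : (c2 - (j+1) < c1 - (i+1)) = (c2 - j < c1 - i) := by apply propext; omega
      have ec2 : (c1 - (i+1) < c2 - (j+1)) = (c1 - i < c2 - j) := by apply propext; omega
      have key : ref c1 c2 (x :: y :: rest) k i j
          = (x :: (phi c1 c2 rest (i+1) (j+1) n).1, y :: (phi c1 c2 rest (i+1) (j+1) n).2) := by
        simp [ref, hd, hd1, hi, hj]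
        rw [show (k+1+1:Int) = k+2 by ring, hrec]
        exact ⟨rfl, rfl⟩
      rw [key]
      unfold phi
      simp only [e1, List.take_succ_cons, List.drop_succ_cons, ec1, ec2, e2, e3]
      split_ifs <;> simp [dealPair]

lemma dealLoop_eq (m : Nat) : ∀ (xs : List Int) (k : Nat) (evens odds : List Int),
    xs.length = k + m →
    dealLoop xs (xs.length : Int) (k : Int) evens odds
      = (evens ++ (dealPair (xs.drop k)).1, odds ++ (dealPair (xs.drop k)).2) := by
  induction m using Nat.strong_induction_on with
  | _ m IH =>
    intro xs k evens odds hlen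
    rw [dealLoop]
    by_cases hk : (k:Int) < (xs.length:Int)
    · rw [if_pos hk]
      have hkl : k < xs.length := by omega
      have g1 : PySem.List.pyGetD xs (k:Int) 0 = xs[k] := by
        rw [PySem.List.pyGetD_natCast, List.getD_eq_getElem?_getD, List.getElem?_eq_getElem hkl,
          Option.getD_some]
      by_cases hk1 : (k:Int) + 1 < (xs.length:Int)
      · have hk1l : k + 1 < xs.length := by omega
        have g2 : PySem.List.pyGetD xs ((k:Int)+1) 0 = xs[k+1] := by
          rw [show ((k:Int)+1) = ((k+1:Nat):Int) by push_cast; ring,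
            PySem.List.pyGetD_natCast, List.getD_eq_getElem?_getD,
            List.getElem?_eq_getElem hk1l, Option.getD_some]
        rw [if_pos hk1, g1, g2,
          show ((k:Int)+2) = ((k+2:Nat):Int) by push_cast; ring,
          IH (m-2) (by omega) xs (k+2) _ _ (by omega)]
        have d1 : xs.drop k = xs[k] :: xs[k+1] :: xs.drop (k+2) := by
          rw [List.drop_eq_getElem_cons hkl, List.drop_eq_getElem_cons hk1l]
        rw [d1]
        simp [dealPair, List.append_assoc]
      · have hlen1 : xs.length = k + 1 := by omega
        rw [if_neg hk1, g1, dealLoop, if_neg (by omega : ¬ (k:Int)+2 < (xs.length:Int))]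
        have d1 : xs.drop k = [xs[k]] := by
          rw [List.drop_eq_getElem_cons hkl]
          simp [List.drop_of_length_le, hlen1]
        rw [d1]
        simp [dealPair]
    · rw [if_neg hk]
      have d1 : xs.drop k = [] := List.drop_of_length_le (by omega)
      rw [d1]
      simp [dealPair]

lemma interleave_split_eq_ref (merged : List Int) (c1 c2 : Int) :
    interleave_split merged c1 c2 = ((ref c1 c2 merged 0 0 0).1, (ref c1 c2 merged 0 0 0).2) := by
  have hA := foldl_stepA c1 c2 merged 0 0 0 [] []
  rw [PySem.List.enumerate_eq_map_pyRange (d := 0), List.foldl_map] at hA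
  unfold interleave_split
  rw [Prod.mk.injEq]
  simp only [List.nil_append] at hA
  exact ⟨hA.1, hA.2⟩

-- ===== VERDICT (by name: the statement is the Claim_ definition above) =====
theorem interleave_split_spec : Claim_equal_interleave_split := by
  intro merged l1 l2 _
  unfold Spec_interleave_split
  rw [interleave_split_eq_ref]
  have hmod : PySem.Int.mod 0 2 = 0 := by rw [mod2_eq]; decide
  have hP0 : 0 ≤ min (max 0 l1) (max 0 l2) := by omega
  have hn : min (max 0 (l1 - 0)) (max 0 (l2 - 0))
      = (((min (max 0 l1) (max 0 l2)).toNat : Nat) : Int) := by omega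
  rw [ref_main (min (max 0 l1) (max 0 l2)).toNat l1 l2 merged 0 0 0 hmod hn]
  simp only [interleave_split_alt, phi, PySem.List.len_eq, sub_zero]
  rw [PySem.List.slice_to merged (show (0:Int) ≤ 2 * min (max 0 l1) (max 0 l2) by omega),
    PySem.List.slice_from merged (show (0:Int) ≤ 2 * min (max 0 l1) (max 0 l2) by omega),
    PySem.List.slice_to (List.drop (2 * min (max 0 l1) (max 0 l2)).toNat merged)
      (show (0:Int) ≤ max 0 l1 - min (max 0 l1) (max 0 l2) by omega),
    PySem.List.slice_to (List.drop (2 * min (max 0 l1) (max 0 l2)).toNat merged)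
      (show (0:Int) ≤ max 0 l2 - min (max 0 l1) (max 0 l2) by omega)]
  have e2p : (2 * min (max 0 l1) (max 0 l2)).toNat = 2 * (min (max 0 l1) (max 0 l2)).toNat := by
    omega
  have hdl := dealLoop_eq (List.take (2 * min (max 0 l1) (max 0 l2)).toNat merged).length
    (List.take (2 * min (max 0 l1) (max 0 l2)).toNat merged) 0 [] [] (by omega)
  simp only [Nat.cast_zero, List.drop_zero, List.nil_append] at hdl
  rw [hdl, e2p]
  have et1 : (l1 - (((min (max 0 l1) (max 0 l2)).toNat : Nat) : Int)).toNat
      = (max 0 l1 - min (max 0 l1) (max 0 l2)).toNat := by omega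
  have et2 : (l2 - (((min (max 0 l1) (max 0 l2)).toNat : Nat) : Int)).toNat
      = (max 0 l2 - min (max 0 l1) (max 0 l2)).toNat := by omega
  rw [et1, et2]
  split_ifs <;> first
    | rfl
    | (rw [Prod.mk.injEq]
       constructor <;>
         simp [show (max 0 l1 - min (max 0 l1) (max 0 l2)).toNat = 0 by omega,
           show (max 0 l2 - min (max 0 l1) (max 0 l2)).toNat = 0 by omega])
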